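-- pv_equiv track=rewrite | github.com/leebee33/codetree-TILs | 240819/1까지 나누기/divide-by-1.py | division_count
-- ===== SOURCE A (Python) =====
-- def division_count(n):
--     count = 0  # 나누는 횟수 초기화
--     i = 1  # 첫 번째 나누는 수
--
--     while n > 1:
--         n //= i  # n을 i로 나누고 몫을 n에 저장
--         count += 1  # 나누는 횟수 증가
--         i += 1  # 나누는 수 증가
--
--     return count
-- ===== SOURCE B (Python) =====
-- def division_count(n):
--     # Count = smallest k with n // k! <= 1: keep a growing factorial
--     # instead of shrinking n in place.
--     count = 0
--     fact = 1
--     while n // fact > 1: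
--         count += 1
--         fact *= count
--     return count
-- ===== Notes on version B (the rewrite author's own statement) =====
-- stated objective: alternative
-- what changed: B never mutates n: using floor(floor(n/a)/b)=floor(n/(a*b)) it maintains a growing factorial and tests the original n against it, instead of A's in-place repeated division by an increasing divisor.
import Mathlib
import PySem

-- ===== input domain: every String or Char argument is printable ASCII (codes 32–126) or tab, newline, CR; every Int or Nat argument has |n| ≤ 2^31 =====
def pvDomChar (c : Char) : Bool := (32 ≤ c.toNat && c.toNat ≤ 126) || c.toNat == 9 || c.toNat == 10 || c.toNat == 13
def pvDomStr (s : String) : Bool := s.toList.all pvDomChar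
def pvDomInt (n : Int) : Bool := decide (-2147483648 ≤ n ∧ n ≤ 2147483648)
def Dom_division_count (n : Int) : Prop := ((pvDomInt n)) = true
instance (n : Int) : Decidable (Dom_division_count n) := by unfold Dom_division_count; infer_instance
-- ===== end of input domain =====

-- B replaces A's in-place repeated division of n by an increasing divisor with a test of
-- the unmodified n against a growing factorial (floor(floor(n/a)/b) = floor(n/(a*b)));
-- objective: alternative.

-- ===== PORT A =====
-- A's while loop: while n > 1: n //= i; count += 1; i += 1.  count and i stay naturals in A.
def divisionCountLoopA (n : Int) (count i : Nat) : Nat :=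
  if n > 1 then
    divisionCountLoopA (PySem.Int.floordiv n i) (count + 1) (i + 1)
  else count
termination_by n.toNat + (if i ≤ 1 then 1 else 0)
decreasing_by
  rename_i h
  rcases Nat.lt_or_ge i 2 with hi | hi
  · interval_cases i
    · simp only [PySem.Int.floordiv, Nat.cast_zero, Int.fdiv_zero]
      simp
      omega
    · simp only [PySem.Int.floordiv, Nat.cast_one, Int.fdiv_one]
      simp
  · have hcast : PySem.Int.floordiv n i = ((n.toNat / i : Nat) : Int) := by
      rw [show n = ((n.toNat : Nat) : Int) by omega]
      exact PySem.Int.floordiv_natCast n.toNat i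
    have h2 : n.toNat / i < n.toNat := Nat.div_lt_self (by omega) (by omega)
    rw [hcast, if_neg (by omega : ¬ i + 1 ≤ 1), if_neg (by omega : ¬ i ≤ 1)]
    simp only [Int.toNat_natCast]
    omega

def division_count (n : Int) : Int :=
  ((divisionCountLoopA n 0 1 : Nat) : Int)

-- ===== PORT B =====
-- B's while loop: while n // fact > 1: count += 1; fact *= count.  n is never modified.
def divisionCountLoopB (n : Int) (count fact : Nat) : Nat :=
  if PySem.Int.floordiv n fact > 1 then
    divisionCountLoopB n (count + 1) (fact * (count + 1))
  else count
termination_by n.toNat + 1 - fact + (if count = 0 then 1 else 0)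
decreasing_by
  rename_i h
  have hf : 1 ≤ fact := by
    by_contra hc
    have : fact = 0 := by omega
    subst this
    simp only [Nat.cast_zero, PySem.Int.floordiv, Int.fdiv_zero] at h
    omega
  have hn : 2 * (fact : Int) ≤ n := by
    have := (PySem.Int.le_floordiv_iff_mul_le (a := n) (b := (fact : Int)) (q := 2)
      (by exact_mod_cast hf)).mp (by omega)
    omega
  have hn' : 2 * fact ≤ n.toNat := by omega
  rcases eq_or_ne count 0 with hc | hc
  · subst hc
    simp only [Nat.mul_one, Nat.zero_add]
    split_ifs <;> first | exact absurd ‹False› id | omega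
  · have hc1 : 1 ≤ count := Nat.one_le_iff_ne_zero.mpr hc
    have h1 : fact + 1 ≤ fact * (count + 1) := by nlinarith
    split_ifs <;> first | exact absurd ‹False› id | omega

def division_count_alt (n : Int) : Int :=
  ((divisionCountLoopB n 0 1 : Nat) : Int)

-- ===== PRECONDITION & SPEC =====
def Spec_division_count (n : Int) (out : Int) : Prop := out = division_count_alt n
instance (n : Int) (out : Int) : Decidable (Spec_division_count n out) := by unfold Spec_division_count; infer_instance

-- ===== CLAIM (what is proved, stated in full; the proofs are below) =====
def Claim_equal_division_count : Prop := ∀ (n : Int), Dom_division_count n → Spec_division_count n (division_count n)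

-- ===== LEMMAS AND PROOFS =====

-- nested floor divisions by positive divisors collapse: (n // a) // b = n // (a*b)
theorem pv_floordiv_floordiv (n a b : Int) (ha : 0 < a) (hb : 0 < b) :
    PySem.Int.floordiv (PySem.Int.floordiv n a) b = PySem.Int.floordiv n (a * b) := by
  rw [PySem.Int.floordiv_eq_ediv_of_pos ha, PySem.Int.floordiv_eq_ediv_of_pos hb,
    PySem.Int.floordiv_eq_ediv_of_pos (by positivity)]
  exact Int.ediv_ediv_of_nonneg (le_of_lt ha)

-- invariant: A's loop on n // c! with divisor c+1 computes what B's loop computes on n with fact = c!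
theorem pv_loop_agree (n : Int) (c fact : Nat) :
    fact = Nat.factorial c →
    divisionCountLoopA (PySem.Int.floordiv n fact) c (c + 1) = divisionCountLoopB n c fact := by
  fun_induction divisionCountLoopB n c fact with
  | case1 c fact h ih =>
    intro hfact
    have hpos : 0 < (fact : Int) := by
      have := Nat.factorial_pos c
      omega
    rw [divisionCountLoopA, if_pos h,
      pv_floordiv_floordiv n fact (((c + 1 : Nat) : Int)) hpos (by positivity),
      show (fact : Int) * (((c + 1 : Nat)) : Int) = ((fact * (c + 1) : Nat) : Int) by
        push_cast; ring]
    exact ih (by rw [hfact, Nat.factorial_succ]; ring)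
  | case2 c fact h =>
    intro _
    rw [divisionCountLoopA, if_neg h]

-- ===== VERDICT (by name: the statement is the Claim_ definition above) =====
theorem division_count_spec : Claim_equal_division_count := by
  intro n _
  unfold Spec_division_count division_count division_count_alt
  have := pv_loop_agree n 0 1 rfl
  rw [show PySem.Int.floordiv n ((1 : Nat) : Int) = n by
    simp [PySem.Int.floordiv, Int.fdiv_one]] at this
  rw [this]
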